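-- pv_equiv track=rewrite | github.com/ohdnf/algo-study | programmers/2019_kakao_blind_recruit/무지의먹방라이브/무지의먹방라이브_장현준.py | solution
-- ===== SOURCE A (Python) =====
-- def solution(food_times, k):
--     # e.g. food_times = [ 105, 105, 3, 2, 2], k = 214
--     from collections import defaultdict
--
--     # 예외 처리
--     if sum(food_times) <= k:
--         return -1
--     N = len(food_times)
--
--     # food_time_dict: {105:2, 3:1, 2:2}
--     # food_time_sorted_keys: [2, 3, 105]
--     food_time_dict = defaultdict(int) # 각 음식량을 카운팅
--     for food_time in food_times:
--         food_time_dict[food_time] += 1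
--
--     food_time_sorted_keys = sorted(list(food_time_dict.keys())) # 음식량 낮은것부터
--
--     prev_amount = 0 # 최근 계산에 활용한 amount
--     remain = N # amount번 순회때, 남은 음식 갯수
--
--     for amount in food_time_sorted_keys: # amount번째 순회
--
--         # if문 : amount번 순회에 이르기전, k < 0 이 되어 break
--             # 이문제는 다음에 먹을 차례의 음식이여서 k <= 0 아닌 k < 0 (딱 맞으면, 다음에 먹을 음식 X => return -1)
--             # 만약 마지막에 먹을 문제를 고르는 것이라면 k <= 0
--         # 1. amount=2 => 214 > (2-0) * 5
--         # 2. amount=3 => 204 > (3-2) * 3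
--         # 3. amount=105 => 201 < (105-3) * 2
--             # break => 현재 amount=105, k=201, remain=2 보존중
--         if k < (amount-prev_amount) * remain:
--             break
--
--         k -= (amount-prev_amount) * remain
--         # 1. k: 214 -= (2-0) * 5
--         # 2. k: 204 -= (3-2) * 3
--
--         remain -= food_time_dict[amount] # 이번 순회로 사라진 음식 갯수 빼줌
--         # 1. remain: 5 -= 2 (음식량 2짜리 음식 갯수: 2)
--         # 2. remain: 3 -= 1 (음식량 3짜리 음식 갯수: 1)
--
--         prev_amount = amount
--         # 1. 0 => 2
--         # 2. 2 => 3
--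
--     # 3. amount=105, k=201, remain=2
--     k %= remain
--     # 3. 201 %= 2
--         # k = 201 vs k = 1
--         # 만약이게 없다면. (남은 음식을 순회하는)반복문을 (200//2)100번 더 반복
--     for index, food_time in enumerate(food_times):
--
--         # 3. food_times [105, 105, 3, 2, 2] 에서 3,2개짜리 음식은 현재 없어진 상태. food_time=3 or 2는 무시
--         if food_time < amount:
--             continue
--
--         # 3-1. index=0, food_time=105, k=1
--         # 3-2. index=1, food_time=105, k=0 (return 1+1)
--         if k == 0:
--             return index+1
--         k -= 1
-- ===== SOURCE B (Python) =====
-- def solution(food_times, k):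
--     # Binary search on the "level" L = last fully eaten food-time, using a
--     # cost oracle cost(L) = sum(min(t, L)): no sorting, no sweep over levels.
--     if sum(food_times) <= k:
--         return -1
--
--     def cost(L):
--         return sum(min(t, L) for t in food_times)
--
--     lo = min([0, k] + food_times)   # cost(lo) <= lo <= k
--     hi = max(food_times)            # cost(hi) = sum > k
--     while lo < hi:
--         mid = (lo + hi + 1) // 2
--         if cost(mid) <= k:
--             lo = mid
--         else:
--             hi = mid - 1
--     survivors = [i for i, t in enumerate(food_times) if t > lo]
--     return survivors[k - cost(lo)] + 1
-- ===== Notes on version B (the rewrite author's own statement) =====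
-- stated objective: alternative
-- what changed: Replaces A's sorted sweep over distinct food amounts (counter dict, running 'remain' and budget subtraction per level, then a countdown scan) by a binary search for the last fully-eaten level L using the cost oracle cost(L)=sum(min(t,L)), followed by direct indexing into the surviving indices at offset k-cost(L); no sorting and no per-level loop.
import Mathlib
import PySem

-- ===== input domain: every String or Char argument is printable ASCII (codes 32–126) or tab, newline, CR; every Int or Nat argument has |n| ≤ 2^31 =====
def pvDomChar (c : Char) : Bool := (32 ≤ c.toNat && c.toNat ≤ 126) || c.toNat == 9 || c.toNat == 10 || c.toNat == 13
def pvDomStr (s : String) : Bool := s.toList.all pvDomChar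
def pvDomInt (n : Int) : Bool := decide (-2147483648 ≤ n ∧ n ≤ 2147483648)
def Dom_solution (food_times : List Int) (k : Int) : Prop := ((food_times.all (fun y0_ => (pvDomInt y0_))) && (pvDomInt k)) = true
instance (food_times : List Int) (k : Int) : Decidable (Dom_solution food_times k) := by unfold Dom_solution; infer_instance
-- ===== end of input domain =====

-- B replaces A's sorted sweep over distinct amounts by a binary search on the
-- last fully-eaten level with a cost oracle, then direct survivor indexing (alternative).

-- ===== PORT A =====
-- A's loop over the sorted distinct amounts; state (k, prev_amount, remain).
-- Returns (amount, k, remain) at break; on exhaustion amount is the last prev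
-- (Python's 'k %= remain' then raises ZeroDivisionError, only outside Pre_).
def solutionLoopA : List Int → PySem.Dict Int Int → Int → Int → Int → Int × Int × Int
  | [], _, k, prev, remain => (prev, k, remain)
  | amount :: rest, d, k, prev, remain =>
    if k < (amount - prev) * remain then (amount, k, remain)
    else solutionLoopA rest d (k - (amount - prev) * remain) amount (remain - d.getD amount 0)

-- A's final 'for index, food_time in enumerate(food_times)' scan.
-- Python falls off the end returning None only outside Pre_; 0 stands in there.
def solutionScanA : List (Int × Int) → Int → Int → Int
  | [], _, _ => 0
  | (index, food_time) :: rest, amount, k =>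
    if food_time < amount then solutionScanA rest amount k
    else if k = 0 then index + 1
    else solutionScanA rest amount (k - 1)

def solution (food_times : List Int) (k : Int) : Int :=
  if food_times.sum ≤ k then -1
  else
    let N : Int := food_times.length
    let food_time_dict := food_times.foldl (fun d t => d.modify t 0 (· + 1)) (PySem.Dict.empty : PySem.Dict Int Int)
    let keys := PySem.List.sorted food_time_dict.keys (fun x => x) false
    let r := solutionLoopA keys food_time_dict k 0 N
    solutionScanA (PySem.List.enumerate food_times 0) r.1 (PySem.Int.mod r.2.1 r.2.2)

-- ===== PORT B =====
-- B's cost oracle: cost(L) = sum(min(t, L) for t in food_times)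
def pvCostB (ts : List Int) (L : Int) : Int := (ts.map (fun t => min t L)).sum

-- B's 'while lo < hi' binary search (mid = (lo+hi+1)//2, Python floor division)
def pvBSearch (ts : List Int) (k lo hi : Int) : Int :=
  if h : lo < hi then
    if pvCostB ts (PySem.Int.floordiv (lo + hi + 1) 2) ≤ k then
      pvBSearch ts k (PySem.Int.floordiv (lo + hi + 1) 2) hi
    else pvBSearch ts k lo (PySem.Int.floordiv (lo + hi + 1) 2 - 1)
  else lo
termination_by (hi - lo).toNat
decreasing_by
  · have hm : PySem.Int.floordiv (lo + hi + 1) 2 = (lo + hi + 1) / 2 :=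
      PySem.Int.floordiv_eq_ediv_of_pos (by omega)
    simp only [hm]; omega
  · have hm : PySem.Int.floordiv (lo + hi + 1) 2 = (lo + hi + 1) / 2 :=
      PySem.Int.floordiv_eq_ediv_of_pos (by omega)
    simp only [hm]; omega

def solution_alt (food_times : List Int) (k : Int) : Int :=
  if food_times.sum ≤ k then -1
  else
    match PySem.List.min? (0 :: k :: food_times) (fun x => x) with
    | none => 0   -- unreachable: the list is nonempty
    | some lo0 =>
      match PySem.List.max? food_times (fun x => x) with
      | none => 0 -- food_times = []: Python max() raises ValueError, outside Pre_
      | some hi0 =>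
        let L := pvBSearch food_times k lo0 hi0
        let survivors := ((PySem.List.enumerate food_times 0).filter (fun q => decide (L < q.2))).map (·.1)
        match PySem.List.pyGet? survivors (k - pvCostB food_times L) with
        | some i => i + 1
        | none => 0  -- out of range: Python IndexError, unreachable under Pre_

-- ===== PRECONDITION & SPEC =====
-- Pre_ excludes only the empty list with k < 0, where BOTH programs raise
-- (A: ZeroDivisionError on 'k %= remain' with remain = 0; B: ValueError on max([])).
def Pre_solution (food_times : List Int) (k : Int) : Prop := food_times ≠ [] ∨ 0 ≤ k
instance (food_times : List Int) (k : Int) : Decidable (Pre_solution food_times k) := by unfold Pre_solution; infer_instance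

def pvWitness_solution : List Int × Int := ([3, 1, 2], 5)

def Spec_solution (food_times : List Int) (k : Int) (out : Int) : Prop := out = solution_alt food_times k
instance (food_times : List Int) (k : Int) (out : Int) : Decidable (Spec_solution food_times k out) := by unfold Spec_solution; infer_instance

-- ===== CLAIM (what is proved, stated in full; the proofs are below) =====
def Claim_equal_solution : Prop := ∀ (food_times : List Int) (k : Int), Dom_solution food_times k → Pre_solution food_times k → Spec_solution food_times k (solution food_times k)

-- ===== LEMMAS AND PROOFS =====

lemma pvCost_mono (ts : List Int) {p q : Int} (h : p ≤ q) : pvCostB ts p ≤ pvCostB ts q := by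
  induction ts with
  | nil => simp [pvCostB]
  | cons t rest ih =>
    simp only [pvCostB, List.map_cons, List.sum_cons] at *
    have : min t p ≤ min t q := by omega
    omega

lemma pvCost_succ (ts : List Int) (L : Int) :
    pvCostB ts (L + 1) = pvCostB ts L + (ts.countP (fun t => decide (L < t)) : Int) := by
  induction ts with
  | nil => simp [pvCostB]
  | cons t rest ih =>
    simp only [pvCostB, List.map_cons, List.sum_cons, List.countP_cons] at *
    by_cases h : L < t
    · simp only [h, decide_true, if_true]
      push_cast
      omega
    · simp only [h, decide_false, if_false]
      push_cast at *
      omega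

lemma pvCost_sum (ts : List Int) {q : Int} (h : ∀ t ∈ ts, t ≤ q) : pvCostB ts q = ts.sum := by
  induction ts with
  | nil => simp [pvCostB]
  | cons t rest ih =>
    simp only [pvCostB, List.map_cons, List.sum_cons] at *
    have h1 := h t (by simp)
    have h2 := ih (fun x hx => h x (by simp [hx]))
    omega

lemma pvCost_const (ts : List Int) {q L : Int} (h : ∀ t ∈ ts, q ≤ t) (hL : L ≤ q) :
    pvCostB ts L = L * (ts.length : Int) := by
  induction ts with
  | nil => simp [pvCostB]
  | cons t rest ih =>
    simp only [pvCostB, List.map_cons, List.sum_cons, List.length_cons] at *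
    have h1 := h t (by simp)
    have h2 := ih (fun x hx => h x (by simp [hx]))
    push_cast
    have : min t L = L := by omega
    rw [this, h2]; ring

lemma pvCost_linear (ts : List Int) {p q L : Int} (hpL : p ≤ L) (hLq : L ≤ q)
    (hgap : ∀ t ∈ ts, t ≤ p ∨ q ≤ t) :
    pvCostB ts L = pvCostB ts p + (L - p) * (ts.countP (fun t => decide (q ≤ t)) : Int) := by
  induction ts with
  | nil => simp [pvCostB]
  | cons t rest ih =>
    simp only [pvCostB, List.map_cons, List.sum_cons, List.countP_cons] at *
    have hrest := ih (fun x hx => hgap x (by simp [hx]))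
    rcases hgap t (by simp) with h | h
    · have h1 : min t L = t := by omega
      have h2 : min t p = t := by omega
      by_cases hq : q ≤ t
      · have : p = L := by omega
        subst this
        simp [sub_self]
      · simp only [h1, h2, hq, decide_false]
        push_cast
        linarith [hrest]
    · have h1 : min t L = L := by omega
      have h2 : min t p = p := by omega
      simp only [h1, h2, h, decide_true, if_true]
      push_cast
      linarith [hrest]

-- uniqueness of the level L with cost(L) ≤ k < cost(L+1)
lemma pvL_uniq (ts : List Int) (k : Int) {L L' : Int}
    (h1 : pvCostB ts L ≤ k) (h2 : k < pvCostB ts (L + 1))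
    (h3 : pvCostB ts L' ≤ k) (h4 : k < pvCostB ts (L' + 1)) : L = L' := by
  rcases lt_trichotomy L L' with h | h | h
  · have := pvCost_mono ts (show L + 1 ≤ L' by omega)
    omega
  · exact h
  · have := pvCost_mono ts (show L' + 1 ≤ L by omega)
    omega

-- existence of the level between two cost samples
lemma pvL_exists (ts : List Int) (k : Int) : ∀ (n : Nat) (p : Int),
    pvCostB ts p ≤ k → k < pvCostB ts (p + n) →
    ∃ L, p ≤ L ∧ L + 1 ≤ p + n ∧ pvCostB ts L ≤ k ∧ k < pvCostB ts (L + 1) := by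
  intro n
  induction n with
  | zero => intro p h1 h2; simp at h2; omega
  | succ m ih =>
    intro p h1 h2
    by_cases hm : pvCostB ts (p + m) ≤ k
    · refine ⟨p + m, by omega, by omega, hm, ?_⟩
      have : p + (m : Int) + 1 = p + ((m : Nat) + 1 : Nat) := by push_cast; ring
      rw [this]; exact_mod_cast h2
    · obtain ⟨L, hL1, hL2, hL3, hL4⟩ := ih p h1 (by omega)
      exact ⟨L, hL1, by omega, hL3, hL4⟩

-- countP split at a value
lemma pvCount_split (ts : List Int) (a : Int) :
    ts.countP (fun t => decide (a ≤ t)) = ts.countP (fun t => decide (a < t)) + ts.count a := by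
  induction ts with
  | nil => simp
  | cons t rest ih =>
    simp only [List.countP_cons, List.count_cons, ih]
    by_cases h1 : a < t
    · have h2 : a ≤ t := le_of_lt h1
      have h3 : ¬ (t = a) := by omega
      simp only [h1, h2, h3, decide_true, decide_false, if_true, if_false, beq_iff_eq]
      omega
    · by_cases h2 : a ≤ t
      · have h3 : t = a := by omega
        subst h3
        simp
        omega
      · have h3 : ¬ (t = a) := by omega
        simp only [h1, h2, h3, decide_true, decide_false, if_true, if_false, beq_iff_eq]
        omega

-- binary search returns the greatest admissible level in [lo, hi]
lemma pvBS_spec (ts : List Int) (k : Int) : ∀ (n : Nat) (lo hi : Int),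
    (hi - lo).toNat = n → lo ≤ hi → pvCostB ts lo ≤ k →
    lo ≤ pvBSearch ts k lo hi ∧ pvBSearch ts k lo hi ≤ hi ∧
    pvCostB ts (pvBSearch ts k lo hi) ≤ k ∧
    (∀ M, M ≤ hi → pvCostB ts M ≤ k → M ≤ pvBSearch ts k lo hi) := by
  intro n
  induction n using Nat.strong_induction_on with
  | _ n ih =>
    intro lo hi hn hle hcost
    rw [pvBSearch]
    by_cases h : lo < hi
    · rw [dif_pos h]
      have hm : PySem.Int.floordiv (lo + hi + 1) 2 = (lo + hi + 1) / 2 :=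
        PySem.Int.floordiv_eq_ediv_of_pos (by omega)
      rw [hm]
      set mid := (lo + hi + 1) / 2 with hmid
      have hmb : lo < mid ∧ mid ≤ hi := by constructor <;> omega
      by_cases hc : pvCostB ts mid ≤ k
      · rw [if_pos hc]
        obtain ⟨g1, g2, g3, g4⟩ := ih ((hi - mid).toNat) (by omega) mid hi rfl (by omega) hc
        exact ⟨by omega, g2, g3, fun M hM hcM => g4 M hM hcM⟩
      · rw [if_neg hc]
        obtain ⟨g1, g2, g3, g4⟩ := ih ((mid - 1 - lo).toNat) (by omega) lo (mid - 1) rfl (by omega) hcost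
        refine ⟨g1, by omega, g3, fun M hM hcM => ?_⟩
        by_cases hMm : M ≤ mid - 1
        · exact g4 M hMm hcM
        · exfalso
          have := pvCost_mono ts (show mid ≤ M by omega)
          omega
    · rw [dif_neg h]
      have : lo = hi := by omega
      subst this
      exact ⟨le_rfl, le_rfl, hcost, fun M hM _ => hM⟩

-- A's countdown scan picks the j-th surviving index
lemma pvScanA_eq : ∀ (l : List (Int × Int)) (amount : Int) (j : Nat)
    (h : j < ((l.filter (fun q => decide (amount ≤ q.2))).map (·.1)).length),
    solutionScanA l amount (j : Int)
      = ((l.filter (fun q => decide (amount ≤ q.2))).map (·.1))[j] + 1 := by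
  intro l
  induction l with
  | nil => intro amount j h; simp at h
  | cons p rest ih =>
    obtain ⟨i, t⟩ := p
    intro amount j h
    by_cases ht : t < amount
    · have hf : (decide (amount ≤ t)) = false := by simp; omega
      rw [solutionScanA, if_pos ht]
      simp only [List.filter_cons, hf, Bool.false_eq_true, if_false] at h ⊢
      exact ih amount j h
    · have hf : (decide (amount ≤ (i, t).2)) = true := by simp; omega
      rw [solutionScanA, if_neg ht]
      simp only [List.filter_cons, hf, if_true] at h ⊢
      cases j with
      | zero => simp
      | succ n =>
        rw [if_neg (by omega)]
        rw [show ((n + 1 : Nat) : Int) - 1 = (n : Int) by omega]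
        simp only [List.map_cons, List.getElem_cons_succ]
        exact ih amount n (by simpa using h)

-- A's level loop, characterized by the cost oracle (later iterations: prev ∈ ts)
lemma pvLoopA_char (ts : List Int) (k : Int) (hsum : k < ts.sum) (hts : ts ≠ []) :
    ∀ (keys : List Int) (kc prev : Int),
    keys.Pairwise (· < ·) →
    (∀ t ∈ ts, (t ∈ keys ↔ prev < t)) →
    (∀ a ∈ keys, a ∈ ts) →
    pvCostB ts prev = k - kc →
    0 ≤ kc →
    ∃ a L k2, a ∈ ts ∧
      solutionLoopA keys (PySem.Dict.counter ts) kc prev ((ts.countP (fun t => decide (prev < t)) : Nat) : Int)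
        = (a, k2, ((ts.countP (fun t => decide (a ≤ t)) : Nat) : Int)) ∧
      pvCostB ts L ≤ k ∧ k < pvCostB ts (L + 1) ∧
      (∀ t ∈ ts, (a ≤ t ↔ L < t)) ∧
      PySem.Int.mod k2 ((ts.countP (fun t => decide (a ≤ t)) : Nat) : Int) = k - pvCostB ts L := by
  intro keys
  induction keys with
  | nil =>
    intro kc prev _ hmem _ hcost hkc
    exfalso
    have : ∀ t ∈ ts, t ≤ prev := by
      intro t ht
      have := hmem t ht
      simp at this
      omega
    have := pvCost_sum ts this
    omega
  | cons a rest ih =>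
    intro kc prev hpw hmem hkeys hcost hkc
    have hats : a ∈ ts := hkeys a (by simp)
    have hpa : prev < a := (hmem a hats).1 (by simp)
    have hrest_gt : ∀ b ∈ rest, a < b := (List.pairwise_cons.1 hpw).1
    have hgap : ∀ t ∈ ts, prev < t → a ≤ t := by
      intro t ht hpt
      rcases List.mem_cons.1 ((hmem t ht).2 hpt) with h | h
      · omega
      · exact le_of_lt (hrest_gt t h)
    have hgap' : ∀ t ∈ ts, t ≤ prev ∨ a ≤ t := by
      intro t ht
      by_cases h : prev < t
      · exact Or.inr (hgap t ht h)
      · exact Or.inl (by omega)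
    have hcntP : ts.countP (fun t => decide (prev < t)) = ts.countP (fun t => decide (a ≤ t)) := by
      apply List.countP_congr
      intro t ht
      have := hgap t ht
      by_cases h : prev < t
      · simp [h, this h]
      · have : ¬ a ≤ t := by omega
        simp [h, this]
    have hcnt_pos : 0 < ts.countP (fun t => decide (a ≤ t)) := by
      rw [List.countP_pos_iff]
      exact ⟨a, hats, by simp⟩
    set cnt : Int := ((ts.countP (fun t => decide (a ≤ t)) : Nat) : Int) with hcnt
    have hcnt0 : 0 < cnt := by rw [hcnt]; exact_mod_cast hcnt_pos
    have hcosta : pvCostB ts a = pvCostB ts prev + (a - prev) * cnt :=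
      pvCost_linear ts (le_of_lt hpa) le_rfl hgap'
    rw [solutionLoopA, hcntP]
    by_cases hbr : kc < (a - prev) * cnt
    · rw [if_pos hbr]
      -- break at a; the level L lies in [prev, a)
      obtain ⟨L, hL1, hL2, hL3, hL4⟩ :=
        pvL_exists ts k ((a - prev).toNat) prev (by omega)
          (by rw [show prev + ((a - prev).toNat : Int) = a by omega]; omega)
      have hsurv : ∀ t ∈ ts, (a ≤ t ↔ L < t) := by
        intro t ht
        constructor
        · intro h; omega
        · intro h; exact hgap t ht (by omega)
      have hcostL : pvCostB ts L = pvCostB ts prev + (L - prev) * cnt :=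
        pvCost_linear ts hL1 (by omega) hgap'
      have hcntL : ts.countP (fun t => decide (L < t)) = ts.countP (fun t => decide (a ≤ t)) := by
        apply List.countP_congr
        intro t ht
        have := hsurv t ht
        by_cases h : L < t
        · simp [h, this.2 h]
        · have : ¬ a ≤ t := fun hh => h (this.1 hh)
          simp [h, this]
      have hrem_lt : k - pvCostB ts L < cnt := by
        have := pvCost_succ ts L
        rw [hcntL] at this
        omega
      refine ⟨a, L, kc, hats, rfl, hL3, hL4, hsurv, ?_⟩
      have hkc_eq : kc = (k - pvCostB ts L) + (L - prev) * cnt := by omega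
      rw [PySem.Int.mod_eq_emod_of_pos hcnt0, hkc_eq, Int.add_mul_emod_self_right _ _ _]
      exact Int.emod_eq_of_lt (by omega) hrem_lt
    · rw [if_neg hbr]
      -- consume level a and recurse
      have hgetD : (PySem.Dict.counter ts).getD a 0 = ((ts.count a : Nat) : Int) :=
        PySem.Dict.getD_counter ts a
      have hsplit := pvCount_split ts a
      have hrem_eq : cnt - (PySem.Dict.counter ts).getD a 0
          = ((ts.countP (fun t => decide (a < t)) : Nat) : Int) := by
        rw [hgetD, hcnt]
        push_cast
        omega
      have hmem' : ∀ t ∈ ts, (t ∈ rest ↔ a < t) := by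
        intro t ht
        constructor
        · intro h; exact hrest_gt t h
        · intro h
          rcases List.mem_cons.1 ((hmem t ht).2 (by omega)) with h' | h'
          · omega
          · exact h'
      obtain ⟨a', L, k2, ha'ts, hloop, g1, g2, g3, g4⟩ :=
        ih (kc - (a - prev) * cnt) a (List.pairwise_cons.1 hpw).2 hmem'
          (fun b hb => hkeys b (List.mem_cons_of_mem _ hb))
          (by rw [hcosta]; omega) (by omega)
      refine ⟨a', L, k2, ha'ts, ?_, g1, g2, g3, g4⟩
      rw [hrem_eq]
      exact hloop


-- the two programs agree on every input admitted by Pre_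
lemma pvMain (ts : List Int) (k : Int) (hpre : Pre_solution ts k) :
    solution ts k = solution_alt ts k := by
  unfold Pre_solution at hpre
  unfold solution solution_alt
  by_cases hsk : ts.sum ≤ k
  · rw [if_pos hsk, if_pos hsk]
  · rw [if_neg hsk, if_neg hsk]
    dsimp only
    have hts : ts ≠ [] := by
      intro h; subst h; simp at hsk
      rcases hpre with h | h
      · exact h rfl
      · omega
    have hN1 : 1 ≤ (ts.length : Int) := by
      have := List.length_pos_of_ne_nil hts
      omega
    set N : Int := (ts.length : Int) with hNdef
    -- A's dict is Counter(ts); its keys are the distinct values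
    have hdc : ts.foldl (fun d t => d.modify t 0 (· + 1)) (PySem.Dict.empty : PySem.Dict Int Int)
        = PySem.Dict.counter ts := rfl
    rw [hdc, PySem.Dict.keys_counter]
    set K := PySem.List.sorted (PySem.Set.ofList ts) (fun x => x) false with hKdef
    have hKpw : K.Pairwise (· < ·) := PySem.List.sorted_ofList_pairwise_lt ts
    have hmemK : ∀ x, x ∈ K ↔ x ∈ ts := by
      intro x; rw [hKdef, PySem.List.mem_sorted, PySem.Set.mem_ofList]
    have hKne : K ≠ [] := by
      obtain ⟨t, ts', rfl⟩ := List.exists_cons_of_ne_nil hts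
      exact List.ne_nil_of_mem ((hmemK t).2 (List.mem_cons_self))
    obtain ⟨a1, K', hK⟩ := List.exists_cons_of_ne_nil hKne
    have ha1ts : a1 ∈ ts := (hmemK a1).1 (by rw [hK]; exact List.mem_cons_self)
    have hKs : PySem.List.sorted (PySem.Set.ofList ts) (fun x => x) false = a1 :: K' := by
      rw [← hKdef]; exact hK
    have ha1min : ∀ t ∈ ts, a1 ≤ t := by
      intro t ht
      have := PySem.List.key_head_sorted_le _ _ hKs t ((PySem.Set.mem_ofList _ _).2 ht)
      simpa using this
    have hNcnt : (ts.countP (fun t => decide (a1 ≤ t))) = ts.length :=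
      List.countP_eq_length.2 (fun t ht => by simpa using ha1min t ht)
    -- the break point and level, unified over the two shapes of the first iteration
    have key : ∃ a L k2, a ∈ ts ∧
        solutionLoopA K (PySem.Dict.counter ts) k 0 N
          = (a, k2, ((ts.countP (fun t => decide (a ≤ t)) : Nat) : Int)) ∧
        pvCostB ts L ≤ k ∧ k < pvCostB ts (L + 1) ∧
        (∀ t ∈ ts, (a ≤ t ↔ L < t)) ∧
        PySem.Int.mod k2 ((ts.countP (fun t => decide (a ≤ t)) : Nat) : Int) = k - pvCostB ts L := by
      rw [hK, solutionLoopA]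
      by_cases hbr : k < (a1 - 0) * N
      · rw [if_pos hbr]
        rw [sub_zero] at hbr
        set d : Int := a1 * N - k with hddef
        have hd1 : 1 ≤ d := by omega
        have hdN : d ≤ d * N := le_mul_of_one_le_right (by omega) hN1
        have hcostp : pvCostB ts (a1 - d) = (a1 - d) * N := pvCost_const ts ha1min (by omega)
        have hcosta1 : pvCostB ts a1 = a1 * N := pvCost_const ts ha1min le_rfl
        have hple : pvCostB ts (a1 - d) ≤ k := by
          rw [hcostp]
          have hx : (a1 - d) * N = a1 * N - d * N := by ring
          omega
        obtain ⟨L, hL1, hL2, hL3, hL4⟩ := pvL_exists ts k d.toNat (a1 - d) hple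
          (by rw [show a1 - d + (d.toNat : Int) = a1 by omega, hcosta1]; omega)
        have hLa1 : L < a1 := by omega
        have hsurv1 : ∀ t ∈ ts, (a1 ≤ t ↔ L < t) := by
          intro t ht
          have := ha1min t ht
          constructor <;> intro <;> omega
        have hcntL : ts.countP (fun t => decide (L < t)) = ts.countP (fun t => decide (a1 ≤ t)) := by
          apply List.countP_congr
          intro t ht
          have h1 := ha1min t ht
          simp only [decide_eq_true_eq]
          constructor <;> intro <;> omega
        have hcostL : pvCostB ts L = L * N := pvCost_const ts ha1min (by omega)
        have hrem_lt : k - pvCostB ts L < N := by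
          have hsucc := pvCost_succ ts L
          rw [hcntL, hNcnt, ← hNdef] at hsucc
          omega
        refine ⟨a1, L, k, ha1ts, by rw [hNcnt], hL3, hL4, hsurv1, ?_⟩
        rw [hNcnt, show ((ts.length : Nat) : Int) = N from hNdef.symm]
        rw [PySem.Int.mod_eq_emod_of_pos (by omega)]
        have hkeq : k = (k - pvCostB ts L) + L * N := by rw [← hcostL]; ring
        have h1 : k % N = (k - pvCostB ts L) % N := by
          conv_lhs => rw [hkeq]
          rw [Int.add_mul_emod_self_right _ _ _]
        rw [h1]
        exact Int.emod_eq_of_lt (by omega) hrem_lt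
      · rw [if_neg hbr]
        have hKpw' : K'.Pairwise (· < ·) := by
          rw [hK] at hKpw; exact (List.pairwise_cons.1 hKpw).2
        have hgtK' : ∀ b ∈ K', a1 < b := by
          rw [hK] at hKpw; exact (List.pairwise_cons.1 hKpw).1
        have hmem' : ∀ t ∈ ts, (t ∈ K' ↔ a1 < t) := by
          intro t ht
          constructor
          · intro h; exact hgtK' t h
          · intro h
            have htK : t ∈ K := (hmemK t).2 ht
            rw [hK] at htK
            rcases List.mem_cons.1 htK with h' | h'
            · omega
            · exact h'
        have hcosta1 : pvCostB ts a1 = a1 * N := pvCost_const ts ha1min le_rfl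
        have hrem_arg : N - (PySem.Dict.counter ts).getD a1 0
            = ((ts.countP (fun t => decide (a1 < t)) : Nat) : Int) := by
          rw [PySem.Dict.getD_counter]
          have := pvCount_split ts a1
          rw [hNdef]
          push_cast
          omega
        obtain ⟨a, L, k2, hats, hloop, g1, g2, g3, g4⟩ :=
          pvLoopA_char ts k (by omega) hts K' (k - (a1 - 0) * N) a1 hKpw' hmem'
            (fun b hb => (hmemK b).1 (hK ▸ List.mem_cons_of_mem _ hb))
            (by rw [hcosta1]; ring)
            (by have := not_lt.1 hbr; linarith)
        refine ⟨a, L, k2, hats, ?_, g1, g2, g3, g4⟩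
        rw [hrem_arg]
        exact hloop
    obtain ⟨a, L, k2, hats, hloop, hcL, hcL1, hsurv, hmod⟩ := key
    rw [hloop]
    dsimp only
    set cnt : Int := ((ts.countP (fun t => decide (a ≤ t)) : Nat) : Int) with hcntdef
    have hcnt0 : (0 : Int) < cnt := by
      rw [hcntdef]
      have : 0 < ts.countP (fun t => decide (a ≤ t)) :=
        List.countP_pos_iff.2 ⟨a, hats, by simp⟩
      exact_mod_cast this
    set rem : Int := k - pvCostB ts L with hremdef
    have hrem0 : 0 ≤ rem := by
      rw [← hmod]; exact PySem.Int.mod_nonneg k2 hcnt0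
    have hremlt : rem < cnt := by
      rw [← hmod]; exact PySem.Int.mod_lt k2 hcnt0
    -- B's min/max bookkeeping
    rcases hmin : PySem.List.min? (0 :: k :: ts) (fun x => x) with _ | m
    · exact absurd ((PySem.List.min?_eq_none_iff _ _).1 hmin) (by simp)
    rcases hmax : PySem.List.max? ts (fun x => x) with _ | M
    · exact absurd ((PySem.List.max?_eq_none_iff _ _).1 hmax) hts
    have hmmin : ∀ y ∈ (0 :: k :: ts), m ≤ y := by
      intro y hy; simpa using PySem.List.min?_isMin hmin y hy
    have hm0 : m ≤ 0 := hmmin 0 (by simp)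
    have hmk : m ≤ k := hmmin k (by simp)
    have hmts : ∀ t ∈ ts, m ≤ t := fun t ht => hmmin t (by simp [ht])
    have hMts : M ∈ ts := PySem.List.max?_mem hmax
    have hMmax : ∀ t ∈ ts, t ≤ M := by
      intro t ht; simpa using PySem.List.max?_isMax hmax t ht
    have hmM : m ≤ M := hmts M hMts
    have hcostm : pvCostB ts m ≤ k := by
      rw [pvCost_const ts hmts le_rfl]
      have h1 : m * N ≤ m * 1 := mul_le_mul_of_nonpos_left (by omega) hm0
      rw [mul_one] at h1
      linarith
    have hcostM : pvCostB ts M = ts.sum := pvCost_sum ts hMmax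
    obtain ⟨g1, g2, g3, g4⟩ := pvBS_spec ts k ((M - m).toNat) m M rfl hmM hcostm
    set LB : Int := pvBSearch ts k m M with hLBdef
    have hLB1 : k < pvCostB ts (LB + 1) := by
      by_contra hcon
      push_neg at hcon
      have hLBM : LB < M := by
        rcases eq_or_lt_of_le g2 with h | h
        · rw [h, hcostM] at g3; omega
        · exact h
      have := g4 (LB + 1) (by omega) hcon
      omega
    have hLeq : L = LB := pvL_uniq ts k hcL hcL1 g3 hLB1
    -- the two survivor lists are the same list
    have hfeq : ((PySem.List.enumerate ts 0).filter (fun q => decide (a ≤ q.2)))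
        = ((PySem.List.enumerate ts 0).filter (fun q => decide (L < q.2))) := by
      apply List.filter_congr
      intro q hq
      have hq2 : q.2 ∈ ts := by
        obtain ⟨i, hi, rfl⟩ := (PySem.List.mem_enumerate_iff _ _ _).1 hq
        exact List.getElem_mem hi
      have hiff := hsurv q.2 hq2
      exact decide_eq_decide.2 hiff
    have hflen : ((PySem.List.enumerate ts 0).filter (fun q => decide (a ≤ q.2))).length
        = ts.countP (fun t => decide (a ≤ t)) := by
      rw [← List.countP_eq_length_filter]
      conv_rhs => rw [show ts = (PySem.List.enumerate ts 0).map (·.2) from (PySem.List.map_snd_enumerate ts 0).symm]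
      rw [List.countP_map]
      rfl
    -- evaluate A's final scan and B's direct index at j = rem
    set j : Nat := rem.toNat with hjdef
    have hjm : (j : Int) = rem := Int.toNat_of_nonneg hrem0
    have hjm' : (j : Int) = k - pvCostB ts L := hjm.trans hremdef
    have hjlt : j < ((((PySem.List.enumerate ts 0).filter (fun q => decide (a ≤ q.2))).map (·.1)).length) := by
      rw [List.length_map, hflen]
      have hx : (j : Int) < cnt := by omega
      rw [hcntdef] at hx
      exact_mod_cast hx
    rw [hmod, ← hjm, pvScanA_eq (PySem.List.enumerate ts 0) a j hjlt]
    dsimp only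
    rw [← hLBdef, ← hLeq, ← hjm', ← hfeq]
    rw [PySem.List.pyGet?_natCast]
    rw [List.getElem?_eq_getElem (by simpa using hjlt)]

-- ===== VERDICT (by name: the statement is the Claim_ definition above) =====
theorem solution_spec : Claim_equal_solution := by
  intro food_times k _ hpre
  unfold Spec_solution
  exact pvMain food_times k hpre
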